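-- pv_equiv track=rewrite | github.com/morningred88/-data-structure-algorithms-in-python | EPI/ch5v_boolean_partition.py | rearrange_boolean_array
-- ===== SOURCE A (Python) =====
-- from typing import List
--
-- def rearrange_boolean_array(A:List[bool]) -> List:
--
--     # Initialize the placement position (index) of the 2 subarrays
--     false, true = 0, len(A)
--     while false < true:
--         if A[false]:
--             true -= 1
--             A[true], A[false] = A[false], A[true]
--         else:
--             false += 1
--     return A
-- ===== SOURCE B (Python) =====
-- from typing import List
--
-- def rearrange_boolean_array(A: List[bool]) -> List:
--     # count-then-rebuild instead of two-pointer swapping; mutates A in place like the original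
--     f = sum(1 for x in A if not x)
--     A[:] = [False] * f + [True] * (len(A) - f)
--     return A
-- ===== Notes on version B (the rewrite author's own statement) =====
-- stated objective: simpler
-- what changed: Replaces the two-pointer in-place swapping loop by a single counting pass followed by rebuilding the list as falses-then-trues.
import Mathlib
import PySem

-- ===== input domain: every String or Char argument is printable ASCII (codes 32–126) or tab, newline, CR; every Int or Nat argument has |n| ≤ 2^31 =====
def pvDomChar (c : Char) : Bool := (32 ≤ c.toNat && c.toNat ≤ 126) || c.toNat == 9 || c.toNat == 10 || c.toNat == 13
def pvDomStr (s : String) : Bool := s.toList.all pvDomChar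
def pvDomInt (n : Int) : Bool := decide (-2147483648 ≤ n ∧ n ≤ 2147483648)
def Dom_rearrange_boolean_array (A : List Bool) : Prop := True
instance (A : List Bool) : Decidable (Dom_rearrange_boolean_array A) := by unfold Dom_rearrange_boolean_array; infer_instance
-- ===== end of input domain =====

-- B replaces A's two-pointer swap loop by count-then-rebuild (simpler); equivalence is about
-- the returned value — both Pythons also mutate A in place to the same final content.


-- ===== PORT A =====
-- the while-loop of A; 'none' branches are unreachable (indices stay in range)
def pvA_loop (A : List Bool) (f t : Nat) : List Bool :=
  if f < t then
    match PySem.List.pyGet? A (f : Int) with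
    | none => A
    | some v =>
      if v then
        match PySem.List.pyGet? A ((t - 1 : Nat) : Int) with
        | none => A
        | some w => pvA_loop ((A.set (t - 1) v).set f w) f (t - 1)
      else pvA_loop A (f + 1) t
  else A
termination_by t - f
decreasing_by all_goals omega

def rearrange_boolean_array (A : List Bool) : List Bool :=
  pvA_loop A 0 A.length

-- ===== PORT B =====
def rearrange_boolean_array_alt (A : List Bool) : List Bool :=
  let f := A.countP (fun x => !x)
  List.replicate f false ++ List.replicate (A.length - f) true

-- ===== PRECONDITION & SPEC =====
def Spec_rearrange_boolean_array (A : List Bool) (out : List Bool) : Prop := out = rearrange_boolean_array_alt A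
instance (A : List Bool) (out : List Bool) : Decidable (Spec_rearrange_boolean_array A out) := by unfold Spec_rearrange_boolean_array; infer_instance

-- ===== CLAIM (what is proved, stated in full; the proofs are below) =====
def Claim_equal_rearrange_boolean_array : Prop := ∀ (A : List Bool), Dom_rearrange_boolean_array A → Spec_rearrange_boolean_array A (rearrange_boolean_array A)

-- ===== LEMMAS AND PROOFS =====

-- generic: set at an index outside [m, m+k) does not change the window (drop m).take k
theorem pv_take_drop_set {α : Type} (l : List α) (n m k : Nat) (a : α) (h : n < m ∨ m + k ≤ n) :
    (((l.set n a).drop m).take k) = ((l.drop m).take k) := by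
  apply List.ext_getElem
  · simp
  · intro i h1 h2
    simp only [List.getElem_take, List.getElem_drop, List.getElem_set]
    have : ¬ n = m + i := by
      simp [List.length_take, List.length_drop] at h1; omega
    rw [if_neg this]

theorem pv_take_set {α : Type} (l : List α) (n m : Nat) (a : α) (h : m ≤ n) :
    ((l.set n a).take m) = (l.take m) := by
  apply List.ext_getElem
  · simp
  · intro i h1 h2
    simp only [List.getElem_take, List.getElem_set]
    have : ¬ n = i := by simp [List.length_take] at h1; omega
    rw [if_neg this]

theorem pv_drop_set {α : Type} (l : List α) (n m : Nat) (a : α) (h : n < m) :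
    ((l.set n a).drop m) = (l.drop m) := by
  apply List.ext_getElem
  · simp
  · intro i h1 h2
    simp only [List.getElem_drop, List.getElem_set]
    have : ¬ n = m + i := by omega
    rw [if_neg this]

theorem pv_count_split (l : List Bool) :
    l.countP (fun x => x) + l.countP (fun x => !x) = l.length := by
  induction l with
  | nil => simp
  | cons x xs ih => cases x <;> simp [List.countP_cons] <;> omega

theorem pv_rep_shift {α : Type} (n : Nat) (a : α) (l : List α) :
    List.replicate n a ++ a :: l = a :: (List.replicate n a ++ l) := by
  induction n with
  | zero => rfl
  | succ => simp_all [List.replicate_succ]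


-- loop invariant: the prefix before f and the suffix from t are untouched, and the middle
-- slice ends up as its falses followed by its trues
theorem pvA_loop_spec (n : Nat) : ∀ (A : List Bool) (f t : Nat), t - f = n → f ≤ t → t ≤ A.length →
    pvA_loop A f t =
      A.take f ++ List.replicate (((A.drop f).take (t - f)).countP (fun x => !x)) false
        ++ List.replicate (((A.drop f).take (t - f)).countP (fun x => x)) true ++ A.drop t := by
  induction n with
  | zero =>
    intro A f t hn hft htl
    have hft' : f = t := by omega
    subst hft'
    rw [pvA_loop]
    simp
  | succ n ih =>
    intro A f t hn hft htl
    have hflt : f < t := by omega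
    have hfA : f < A.length := by omega
    rw [pvA_loop, if_pos hflt]
    rw [PySem.List.pyGet?_natCast, List.getElem?_eq_getElem hfA]
    have ht1A : t - 1 < A.length := by omega
    rw [PySem.List.pyGet?_natCast, List.getElem?_eq_getElem ht1A]
    cases hv : A[f] with
    | false =>
      simp only
      rw [ih A (f+1) t (by omega) (by omega) htl]
      have hmid : (A.drop f).take (t - f) = false :: (A.drop (f+1)).take (t - (f+1)) := by
        rw [List.drop_eq_getElem_cons hfA, hv, show t - f = (t - (f+1)) + 1 by omega,
          List.take_succ_cons]
      have htake : A.take (f+1) = A.take f ++ [false] := by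
        rw [List.take_add_one, List.getElem?_eq_getElem hfA, hv]; rfl
      rw [hmid, htake]
      simp [List.replicate_succ]
    | true =>
      simp only
      set w := A[t-1] with hw
      set A' := (A.set (t-1) true).set f w with hA'
      have hlen : A'.length = A.length := by simp [hA']
      rw [ih A' f (t-1) (by omega) (by omega) (by omega)]
      have h1 : A'.take f = A.take f := by
        rw [hA', pv_take_set _ f f _ (le_refl f), pv_take_set _ (t-1) f _ (by omega)]
      have hA't : A'[t-1]'(by omega) = true := by
        simp only [hA', List.getElem_set]
        split
        · next hfe => subst hfe; simp [hw, hv]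
        · simp
      have h2 : A'.drop (t-1) = true :: A.drop t := by
        rw [List.drop_eq_getElem_cons (by omega : t - 1 < A'.length), hA't,
          show t - 1 + 1 = t by omega, hA', pv_drop_set _ f t _ (by omega),
          pv_drop_set _ (t-1) t _ (by omega)]
      by_cases hft1 : f = t - 1
      · -- the two pointers meet: middle slice is the single element A[f] = true
        have hmid : (A.drop f).take (t - f) = [true] := by
          rw [List.drop_eq_getElem_cons hfA, hv, show t - f = 1 by omega]
          rfl
        have hmid'' : (A'.drop f).take (t - 1 - f) = ([] : List Bool) := by
          rw [show t - 1 - f = 0 by omega]; rfl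
        rw [hmid, hmid'', h1, h2]
        simp [List.replicate_succ]
      · -- f < t - 1
        have hflt1 : f < t - 1 := by omega
        have hA'f : A'[f]'(by omega) = w := by
          simp only [hA', List.getElem_set]; simp
        have hdA1 : t - f - 2 < (A.drop (f+1)).length := by
          simp [List.length_drop]; omega
        have hgd : (A.drop (f+1))[t - f - 2]'hdA1 = w := by
          rw [List.getElem_drop, hw]
          congr 1
          omega
        have hS : ((A'.drop (f+1)).take (t - f - 2)) = ((A.drop (f+1)).take (t - f - 2)) := by
          rw [hA', pv_take_drop_set _ f (f+1) _ _ (by omega),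
            pv_take_drop_set _ (t-1) (f+1) _ _ (by omega)]
        have hmid : (A.drop f).take (t - f)
            = true :: ((A.drop (f+1)).take (t - f - 2) ++ [w]) := by
          rw [List.drop_eq_getElem_cons hfA, hv, show t - f = (t - f - 2) + 1 + 1 by omega,
            List.take_succ_cons, List.take_add_one, List.getElem?_eq_getElem hdA1, hgd]
          rfl
        have hmid'' : (A'.drop f).take (t - 1 - f)
            = w :: (A.drop (f+1)).take (t - f - 2) := by
          rw [List.drop_eq_getElem_cons (by omega : f < A'.length), hA'f,
            show t - 1 - f = (t - f - 2) + 1 by omega, List.take_succ_cons, hS]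
        rw [hmid, hmid'', h1, h2]
        cases w <;>
          simp [List.countP_append, List.replicate_succ,
            List.append_assoc, pv_rep_shift]


theorem rearrange_boolean_array_spec : Claim_equal_rearrange_boolean_array := by
  intro A _
  unfold Spec_rearrange_boolean_array rearrange_boolean_array rearrange_boolean_array_alt
  rw [pvA_loop_spec A.length A 0 A.length rfl (Nat.zero_le _) (le_refl _)]
  simp only [List.take_zero, List.drop_zero, Nat.sub_zero, List.take_length,
    List.drop_length, List.nil_append, List.append_nil]
  have h := pv_count_split A
  rw [show List.countP (fun x => x) A = A.length - List.countP (fun x => !x) A by omega]
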